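-- pv_equiv track=rewrite | github.com/Taras1007/learn-python-hillel | lesson 12/tech_inventory.csv.py | calculate_brand_by_category
-- ===== SOURCE A (Python) =====
-- def calculate_brand_by_category(inventory):
--     """
--     Фуекція для підрахунку товарів по брендам для кожної категорії
--
--     :param inventory: список товарів
--
--     :return: словник розподілених товарів
--     """
--     dick_brand_in_category = {}
--     for item in inventory:
--         brand = item["brand"]
--         category = item["category"]
--         if category not in dick_brand_in_category:
--             dick_brand_in_category[category] = {}
--         if brand not in dick_brand_in_category[category]:
--             dick_brand_in_category[category][brand] = 0
--         dick_brand_in_category[category][brand] += 1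
--     return dick_brand_in_category
-- ===== SOURCE B (Python) =====
-- def calculate_brand_by_category(inventory):
--     counts = {}
--     for item in inventory:
--         key = (item["category"], item["brand"])
--         counts[key] = counts.get(key, 0) + 1
--     result = {}
--     for (category, brand), n in counts.items():
--         result.setdefault(category, {})[brand] = n
--     return result
-- ===== Notes on version B (the rewrite author's own statement) =====
-- stated objective: alternative
-- what changed: B counts in one pass into a flat dict keyed by (category, brand) pairs and then reshapes that flat counter into the nested dict in a second pass, instead of building and updating nested dicts in place per item.
import Mathlib
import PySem

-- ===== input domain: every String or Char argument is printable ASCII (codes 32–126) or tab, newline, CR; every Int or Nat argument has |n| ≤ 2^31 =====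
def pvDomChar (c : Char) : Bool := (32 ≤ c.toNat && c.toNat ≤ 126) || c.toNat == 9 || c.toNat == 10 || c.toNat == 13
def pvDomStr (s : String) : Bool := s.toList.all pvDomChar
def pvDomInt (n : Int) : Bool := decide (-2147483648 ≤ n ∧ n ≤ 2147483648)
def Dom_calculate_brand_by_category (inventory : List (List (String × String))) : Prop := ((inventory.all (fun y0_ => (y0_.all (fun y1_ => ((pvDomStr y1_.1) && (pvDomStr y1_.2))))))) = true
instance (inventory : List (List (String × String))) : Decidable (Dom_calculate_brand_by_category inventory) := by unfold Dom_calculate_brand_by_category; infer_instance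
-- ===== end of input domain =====

-- B builds a flat (category, brand) counter in one pass and reshapes it into the nested
-- dict in a second pass, instead of A's in-place nested-dict updates; same cost, different decomposition.

-- ===== PORT A =====
-- A's loop body: nested-dict update for one item
def pvStepA (d : PySem.Dict String (PySem.Dict String Int)) (item : List (String × String)) :
    PySem.Dict String (PySem.Dict String Int) :=
  let brand := (PySem.Dict.mk item).getD "brand" ""
  let category := (PySem.Dict.mk item).getD "category" ""
  let d := if d.contains category then d else d.insert category PySem.Dict.empty
  let d := if (d.getD category PySem.Dict.empty).contains brand then d
           else d.insert category ((d.getD category PySem.Dict.empty).insert brand 0)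
  d.insert category ((d.getD category PySem.Dict.empty).insert brand
    ((d.getD category PySem.Dict.empty).getD brand 0 + 1))

def calculate_brand_by_category (inventory : List (List (String × String))) :
    List (String × List (String × Int)) :=
  ((inventory.foldl pvStepA PySem.Dict.empty).items).map (fun q => (q.1, q.2.items))

-- ===== PORT B =====
-- B's first loop body: bump the flat counter at key (category, brand)
def pvFlatStep (f : PySem.Dict (String × String) Int) (item : List (String × String)) :
    PySem.Dict (String × String) Int :=
  let key := ((PySem.Dict.mk item).getD "category" "", (PySem.Dict.mk item).getD "brand" "")
  f.insert key (f.getD key 0 + 1)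

-- B's second loop body: result.setdefault(category, {})[brand] = n
def pvRStep (r : PySem.Dict String (PySem.Dict String Int)) (p : (String × String) × Int) :
    PySem.Dict String (PySem.Dict String Int) :=
  let r := r.setdefault p.1.1 PySem.Dict.empty
  r.insert p.1.1 ((r.getD p.1.1 PySem.Dict.empty).insert p.1.2 p.2)

def calculate_brand_by_category_alt (inventory : List (List (String × String))) :
    List (String × List (String × Int)) :=
  let counts := inventory.foldl pvFlatStep PySem.Dict.empty
  let result := counts.items.foldl pvRStep PySem.Dict.empty
  result.items.map (fun q => (q.1, q.2.items))

-- ===== PRECONDITION & SPEC =====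
-- Pre_ excludes items missing a "brand" or "category" key, on which the Python A raises KeyError.
def Pre_calculate_brand_by_category (inventory : List (List (String × String))) : Prop :=
  ∀ item ∈ inventory, "brand" ∈ item.map Prod.fst ∧ "category" ∈ item.map Prod.fst
instance (inventory : List (List (String × String))) : Decidable (Pre_calculate_brand_by_category inventory) := by unfold Pre_calculate_brand_by_category; infer_instance
def pvWitness_calculate_brand_by_category : (List (List (String × String))) :=
  [[("brand", "Apple"), ("category", "laptop")], [("brand", "HP"), ("category", "laptop")]]

def Spec_calculate_brand_by_category (inventory : List (List (String × String))) (out : List (String × List (String × Int))) : Prop := out = calculate_brand_by_category_alt inventory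
instance (inventory : List (List (String × String))) (out : List (String × List (String × Int))) : Decidable (Spec_calculate_brand_by_category inventory out) := by unfold Spec_calculate_brand_by_category; infer_instance

-- ===== CLAIM (what is proved, stated in full; the proofs are below) =====
def Claim_equal_calculate_brand_by_category : Prop := ∀ (inventory : List (List (String × String))), Dom_calculate_brand_by_category inventory → Pre_calculate_brand_by_category inventory → Spec_calculate_brand_by_category inventory (calculate_brand_by_category inventory)

-- ===== LEMMAS AND PROOFS =====

-- the common effect of one item with category c, brand b on the nested dict
def pvBump (d : PySem.Dict String (PySem.Dict String Int)) (c b : String) :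
    PySem.Dict String (PySem.Dict String Int) :=
  d.insert c ((d.getD c PySem.Dict.empty).insert b
    ((d.getD c PySem.Dict.empty).getD b 0 + 1))

lemma pv_setdefault_insert_self {κ ν : Type} [BEq κ] [LawfulBEq κ]
    (d : PySem.Dict κ ν) (k : κ) (v x : ν) :
    (d.setdefault k v).insert k x = d.insert k x := by
  by_cases h : d.contains k
  · rw [PySem.Dict.setdefault_of_contains _ _ h]
  · rw [PySem.Dict.setdefault_of_not_contains _ _ (by simpa using h),
        PySem.Dict.insert_insert_self]

lemma pv_getD_setdefault_of_ne {κ ν : Type} [BEq κ] [LawfulBEq κ]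
    (d : PySem.Dict κ ν) {k k' : κ} (v d0 : ν) (h : k' ≠ k) :
    (d.setdefault k v).getD k' d0 = d.getD k' d0 := by
  rw [PySem.Dict.getD_eq_get?_getD, PySem.Dict.get?_setdefault_of_ne _ _ h,
      ← PySem.Dict.getD_eq_get?_getD]

lemma pv_insert_comm {κ ν : Type} [BEq κ] [LawfulBEq κ]
    (d : PySem.Dict κ ν) (k k' : κ) (v w : ν) (hk : d.contains k = true) (hne : k ≠ k') :
    (d.insert k v).insert k' w = (d.insert k' w).insert k v := by
  apply PySem.Dict.ext
  by_cases hk' : d.contains k' = true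
  · have h1 : (d.insert k v).contains k' = true := by
      rw [PySem.Dict.contains_insert]; simp [hk']
    have h2 : (d.insert k' w).contains k = true := by
      rw [PySem.Dict.contains_insert]; simp [hk]
    rw [PySem.Dict.items_insert_of_contains (d.insert k v) w h1,
        PySem.Dict.items_insert_of_contains d v hk,
        PySem.Dict.items_insert_of_contains (d.insert k' w) v h2,
        PySem.Dict.items_insert_of_contains d w hk',
        List.map_map, List.map_map]
    apply List.map_congr_left
    intro p _
    simp only [Function.comp]
    by_cases h1 : p.1 = k <;> by_cases h2 : p.1 = k' <;>
      simp [h1, h2, hne, Ne.symm hne]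
  · have h1 : (d.insert k v).contains k' = false := by
      rw [PySem.Dict.contains_insert]
      simp only [Bool.or_eq_false_iff]
      exact ⟨by simp [Ne.symm hne], by simpa using hk'⟩
    have h2 : (d.insert k' w).contains k = true := by
      rw [PySem.Dict.contains_insert]; simp [hk]
    rw [PySem.Dict.items_insert_of_not_contains (d.insert k v) w h1,
        PySem.Dict.items_insert_of_contains d v hk,
        PySem.Dict.items_insert_of_contains (d.insert k' w) v h2,
        PySem.Dict.items_insert_of_not_contains d w (by simpa using hk'),
        List.map_append]
    simp [Ne.symm hne]

lemma pv_getD_rstep (d : PySem.Dict String (PySem.Dict String Int))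
    (p : (String × String) × Int) (c : String) :
    (pvRStep d p).getD c PySem.Dict.empty =
      if c = p.1.1 then (d.getD c PySem.Dict.empty).insert p.1.2 p.2
      else d.getD c PySem.Dict.empty := by
  unfold pvRStep
  by_cases h : c = p.1.1
  · subst h
    rw [PySem.Dict.getD_insert_self, PySem.Dict.getD_setdefault_self]
    simp
  · rw [PySem.Dict.getD_insert_of_ne _ _ _ h, pv_getD_setdefault_of_ne _ _ _ h]
    simp [h]

lemma pv_contains_rstep (d : PySem.Dict String (PySem.Dict String Int))
    (p : (String × String) × Int) (c : String) :
    (pvRStep d p).contains c = (c == p.1.1 || d.contains c) := by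
  unfold pvRStep
  rw [PySem.Dict.contains_insert, PySem.Dict.contains_setdefault]
  cases h : (c == p.1.1) <;> simp

lemma pv_contains_inner_foldl (l : List ((String × String) × Int))
    (d : PySem.Dict String (PySem.Dict String Int)) (c b : String) :
    ((l.foldl pvRStep d).getD c PySem.Dict.empty).contains b =
      (((d.getD c PySem.Dict.empty).contains b) || l.any (fun p => p.1 == (c, b))) := by
  induction l generalizing d with
  | nil => simp
  | cons p l ih =>
    obtain ⟨⟨c', b'⟩, n⟩ := p
    simp only [List.foldl_cons, List.any_cons, ih, pv_getD_rstep]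
    by_cases h : c = c'
    · subst h
      rw [if_pos rfl, PySem.Dict.contains_insert]
      by_cases hb : b = b'
      · subst hb; simp
      · have he : ((c, b') == (c, b)) = false := by
          simp [beq_eq_false_iff_ne, Ne.symm hb, Prod.ext_iff]
        have hbe : (b == b') = false := beq_eq_false_iff_ne.mpr hb
        rw [he, hbe]
        simp
    · rw [if_neg h]
      have he : ((c', b') == (c, b)) = false := by
        simp only [beq_eq_false_iff_ne, Ne, Prod.mk.injEq, not_and]
        intro hx; exact absurd hx.symm h
      rw [he]
      simp

lemma pv_rstep_fresh (d : PySem.Dict String (PySem.Dict String Int)) (c b : String)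
    (hD : ((d.getD c PySem.Dict.empty).contains b) = false) :
    pvRStep d ((c, b), 0 + 1) = pvBump d c b := by
  unfold pvRStep pvBump
  dsimp only
  rw [PySem.Dict.getD_setdefault_self, pv_setdefault_insert_self,
      PySem.Dict.getD_of_not_contains _ _ hD]

lemma pv_bump_rstep (d : PySem.Dict String (PySem.Dict String Int)) (c b : String) (n : Int) :
    pvBump (pvRStep d ((c, b), n)) c b = pvRStep d ((c, b), n + 1) := by
  unfold pvBump pvRStep
  simp only [PySem.Dict.getD_insert_self, PySem.Dict.getD_setdefault_self,
    PySem.Dict.insert_insert_self]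

lemma pv_bump_rstep_comm (d : PySem.Dict String (PySem.Dict String Int)) (c b : String)
    (p : (String × String) × Int) (hc : d.contains c = true)
    (hb : (d.getD c PySem.Dict.empty).contains b = true) (hne : p.1 ≠ (c, b)) :
    pvBump (pvRStep d p) c b = pvRStep (pvBump d c b) p := by
  obtain ⟨⟨c', b'⟩, n⟩ := p
  by_cases hcc : c = c'
  · subst hcc
    have hbb : b ≠ b' := fun hx => hne (by simp [hx])
    have e1 : pvRStep d ((c, b'), n) =
        d.insert c ((d.getD c PySem.Dict.empty).insert b' n) := by
      unfold pvRStep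
      dsimp only
      rw [PySem.Dict.setdefault_of_contains _ _ hc]
    have e2 : pvRStep (pvBump d c b) ((c, b'), n) =
        d.insert c (((d.getD c PySem.Dict.empty).insert b
          ((d.getD c PySem.Dict.empty).getD b 0 + 1)).insert b' n) := by
      unfold pvRStep pvBump
      dsimp only
      rw [PySem.Dict.setdefault_of_contains _ _ (PySem.Dict.contains_insert_self _ _ _),
          PySem.Dict.getD_insert_self, PySem.Dict.insert_insert_self]
    rw [e1, e2]
    unfold pvBump
    rw [PySem.Dict.getD_insert_self, PySem.Dict.insert_insert_self,
        PySem.Dict.getD_insert_of_ne _ _ _ hbb,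
        pv_insert_comm _ b b' _ _ hb hbb]
  · have e1 : pvRStep d ((c', b'), n) =
        (d.setdefault c' PySem.Dict.empty).insert c'
          ((d.getD c' PySem.Dict.empty).insert b' n) := by
      unfold pvRStep
      dsimp only
      rw [PySem.Dict.getD_setdefault_self]
    have hIc : ((d.setdefault c' PySem.Dict.empty).insert c'
        ((d.getD c' PySem.Dict.empty).insert b' n)).getD c PySem.Dict.empty =
        d.getD c PySem.Dict.empty := by
      rw [PySem.Dict.getD_insert_of_ne _ _ _ hcc, pv_getD_setdefault_of_ne _ _ _ hcc]
    have e2 : pvRStep (pvBump d c b) ((c', b'), n) =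
        ((pvBump d c b).setdefault c' PySem.Dict.empty).insert c'
          ((d.getD c' PySem.Dict.empty).insert b' n) := by
      unfold pvRStep pvBump
      dsimp only
      rw [PySem.Dict.getD_setdefault_self, PySem.Dict.getD_insert_of_ne _ _ _ (Ne.symm hcc)]
    rw [e1, e2]
    unfold pvBump
    rw [hIc]
    by_cases hc' : d.contains c' = true
    · rw [PySem.Dict.setdefault_of_contains _ _ hc',
          PySem.Dict.setdefault_of_contains _ _
            (by rw [PySem.Dict.contains_insert]; simp [hc']),
          pv_insert_comm d c c' _ _ hc hcc]
    · have hf : (d.insert c ((d.getD c PySem.Dict.empty).insert b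
          ((d.getD c PySem.Dict.empty).getD b 0 + 1))).contains c' = false := by
        rw [PySem.Dict.contains_insert]
        simp only [Bool.or_eq_false_iff]
        exact ⟨by simp [beq_eq_false_iff_ne, Ne.symm hcc], by simpa using hc'⟩
      rw [PySem.Dict.setdefault_of_not_contains _ _ (by simpa using hc'),
          PySem.Dict.setdefault_of_not_contains _ _ hf,
          PySem.Dict.insert_insert_self, PySem.Dict.insert_insert_self,
          pv_insert_comm d c c' _ _ hc hcc]

lemma pv_bump_foldl_comm (l : List ((String × String) × Int))
    (d : PySem.Dict String (PySem.Dict String Int)) (c b : String)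
    (hc : d.contains c = true) (hb : (d.getD c PySem.Dict.empty).contains b = true)
    (hl : ∀ p ∈ l, p.1 ≠ (c, b)) :
    pvBump (l.foldl pvRStep d) c b = l.foldl pvRStep (pvBump d c b) := by
  induction l generalizing d with
  | nil => rfl
  | cons p l ih =>
    simp only [List.foldl_cons]
    rw [← pv_bump_rstep_comm d c b p hc hb (hl p (List.mem_cons_self))]
    exact ih (pvRStep d p)
      (by rw [pv_contains_rstep]; simp [hc])
      (by rw [pv_getD_rstep]
          split
          · rw [PySem.Dict.contains_insert]; simp [hb]
          · exact hb)
      (fun q hq => hl q (List.mem_cons_of_mem _ hq))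

lemma pv_reshape_insert (f : PySem.Dict (String × String) Int) (c b : String)
    (h : f.keys.Nodup) :
    ((f.insert (c, b) (f.getD (c, b) 0 + 1)).items).foldl pvRStep PySem.Dict.empty =
      pvBump ((f.items).foldl pvRStep PySem.Dict.empty) c b := by
  by_cases hk : f.contains (c, b) = true
  · have hget : (f.get? (c, b)).isSome := by rw [← PySem.Dict.contains_eq_isSome_get?]; exact hk
    obtain ⟨v, hv⟩ := Option.isSome_iff_exists.mp hget
    have hmem : ((c, b), v) ∈ f.items := PySem.Dict.mem_items_of_get?_eq_some _ hv
    obtain ⟨l1, l2, hsplit⟩ := List.append_of_mem hmem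
    have hgetD : f.getD (c, b) 0 = v := PySem.Dict.getD_of_mem_items _ hmem h 0
    have hnd : ((c, b) ∉ l1.map Prod.fst) ∧ ((c, b) ∉ l2.map Prod.fst) := by
      have hkeq : f.keys = (l1 ++ ((c, b), v) :: l2).map Prod.fst := by
        show f.items.map Prod.fst = _
        rw [hsplit]
      rw [hkeq] at h
      simp only [List.map_append, List.map_cons, List.nodup_append] at h
      obtain ⟨-, h2, h3⟩ := h
      exact ⟨fun hx => h3 _ hx _ (List.mem_cons_self) rfl, (List.nodup_cons.mp h2).1⟩
    have hitems : (f.insert (c, b) (f.getD (c, b) 0 + 1)).items =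
        l1 ++ ((c, b), v + 1) :: l2 := by
      rw [PySem.Dict.items_insert_of_contains _ _ hk, hsplit, hgetD, List.map_append,
          List.map_cons]
      have e1 : List.map (fun p => if (p.1 == ((c, b) : String × String)) = true
          then (((c, b) : String × String), v + 1) else p) l1 = l1 := by
        calc List.map (fun p => if (p.1 == ((c, b) : String × String)) = true
              then (((c, b) : String × String), v + 1) else p) l1
            = List.map id l1 := by
              apply List.map_congr_left
              intro q hq
              have hq1 : q.1 ≠ (c, b) := fun he => hnd.1 (he ▸ List.mem_map_of_mem hq)
              simp [hq1]
          _ = l1 := List.map_id l1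
      have e3 : List.map (fun p => if (p.1 == ((c, b) : String × String)) = true
          then (((c, b) : String × String), v + 1) else p) l2 = l2 := by
        calc List.map (fun p => if (p.1 == ((c, b) : String × String)) = true
              then (((c, b) : String × String), v + 1) else p) l2
            = List.map id l2 := by
              apply List.map_congr_left
              intro q hq
              have hq2 : q.1 ≠ (c, b) := fun he => hnd.2 (he ▸ List.mem_map_of_mem hq)
              simp [hq2]
          _ = l2 := List.map_id l2
      rw [e1, e3]
      simp
    rw [hitems, hsplit, List.foldl_append, List.foldl_append, List.foldl_cons,
        List.foldl_cons]
    rw [pv_bump_foldl_comm _ _ c b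
          (by rw [pv_contains_rstep]; simp)
          (by rw [pv_getD_rstep]; simp [PySem.Dict.contains_insert_self])
          (fun q hq => fun he => hnd.2 (he ▸ List.mem_map_of_mem hq)),
        pv_bump_rstep]
  · have hk' : f.contains (c, b) = false := by simpa using hk
    rw [PySem.Dict.items_insert_of_not_contains _ _ hk',
        PySem.Dict.getD_of_not_contains _ _ hk', List.foldl_append, List.foldl_cons,
        List.foldl_nil]
    apply pv_rstep_fresh
    rw [pv_contains_inner_foldl]
    simp only [PySem.Dict.getD_empty, PySem.Dict.contains_empty, Bool.false_or]
    rw [List.any_eq_false]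
    intro q hq
    simp only [beq_iff_eq]
    intro he
    have hmk : (c, b) ∈ f.keys := he ▸ PySem.Dict.mem_keys_of_mem_items _ hq
    rw [← PySem.Dict.contains_iff_mem_keys] at hmk
    simp [hmk] at hk'

lemma pv_stepA_eq_bump (d : PySem.Dict String (PySem.Dict String Int))
    (item : List (String × String)) :
    pvStepA d item = pvBump d ((PySem.Dict.mk item).getD "category" "")
      ((PySem.Dict.mk item).getD "brand" "") := by
  unfold pvStepA pvBump
  simp only
  set b := (PySem.Dict.mk item).getD "brand" "" with hbdef
  set c := (PySem.Dict.mk item).getD "category" "" with hcdef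
  by_cases hc : d.contains c = true
  · rw [if_pos hc]
    by_cases hb : (d.getD c PySem.Dict.empty).contains b = true
    · rw [if_pos hb]
    · rw [if_neg hb, PySem.Dict.getD_insert_self, PySem.Dict.getD_insert_self,
          PySem.Dict.insert_insert_self, PySem.Dict.insert_insert_self,
          PySem.Dict.getD_of_not_contains (d.getD c PySem.Dict.empty) 0 (by simpa using hb)]
  · rw [if_neg hc, PySem.Dict.getD_insert_self, PySem.Dict.contains_empty,
        if_neg (by simp), PySem.Dict.insert_insert_self, PySem.Dict.getD_insert_self,
        PySem.Dict.getD_insert_self, PySem.Dict.insert_insert_self,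
        PySem.Dict.getD_of_not_contains d PySem.Dict.empty (by simpa using hc)]
    simp [PySem.Dict.getD_empty, PySem.Dict.insert_insert_self]

lemma pv_main (inv : List (List (String × String))) (f : PySem.Dict (String × String) Int)
    (h : f.keys.Nodup) :
    inv.foldl pvStepA ((f.items).foldl pvRStep PySem.Dict.empty) =
      (((inv.foldl pvFlatStep f).items).foldl pvRStep PySem.Dict.empty) := by
  induction inv generalizing f with
  | nil => rfl
  | cons item inv ih =>
    simp only [List.foldl_cons]
    rw [pv_stepA_eq_bump, ← pv_reshape_insert f _ _ h]
    exact ih (pvFlatStep f item) (PySem.Dict.nodup_keys_insert _ _ _ h)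

-- ===== VERDICT (by name: the statement is the Claim_ definition above) =====
theorem calculate_brand_by_category_spec : Claim_equal_calculate_brand_by_category := by
  intro inv _ _
  show calculate_brand_by_category inv = calculate_brand_by_category_alt inv
  exact congrArg (List.map _) (congrArg PySem.Dict.items
    (pv_main inv PySem.Dict.empty PySem.Dict.nodup_keys_empty))
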